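-- pv_equiv track=rewrite | github.com/AkshatRastogi-1nC0re/HTPRED | HTPred_Code/COFormula.py | xorsfc
-- ===== SOURCE A (Python) =====
-- def xorsfc(sc0, sc1):
--     f_sc0 = min(sc0[0], sc1[0])
--     f_sc1 = min(sc1[0], sc0[0])
--
--     for i in range(1, len(sc0)):
--         temp_sc0 = min(f_sc0 + sc0[i], f_sc1 + sc1[i])
--         temp_sc1 = min(f_sc1 + sc0[i], f_sc0 + sc1[i])
--         f_sc0 = temp_sc0
--         f_sc1 = temp_sc1
--
--     return f_sc0, f_sc1
-- ===== SOURCE B (Python) =====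
-- def xorsfc(sc0, sc1):
--     # Pairwise traversal: the swap DP's two states coincide, and the common
--     # value is just the running sum of element-wise minima of the two arrays.
--     total = 0
--     for a, b in zip(sc0, sc1):
--         total += a if a < b else b
--     return total, total
-- ===== Notes on version B (the rewrite author's own statement) =====
-- stated objective: simpler
-- what changed: A's two-state swap DP over indices collapses: both states start equal and stay equal, so B traverses the two lists pairwise (zip) accumulating the sum of element-wise minima and returns that sum twice; per element one min replaces A's four additions, two mins and tuple rebuild.
import Mathlib
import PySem

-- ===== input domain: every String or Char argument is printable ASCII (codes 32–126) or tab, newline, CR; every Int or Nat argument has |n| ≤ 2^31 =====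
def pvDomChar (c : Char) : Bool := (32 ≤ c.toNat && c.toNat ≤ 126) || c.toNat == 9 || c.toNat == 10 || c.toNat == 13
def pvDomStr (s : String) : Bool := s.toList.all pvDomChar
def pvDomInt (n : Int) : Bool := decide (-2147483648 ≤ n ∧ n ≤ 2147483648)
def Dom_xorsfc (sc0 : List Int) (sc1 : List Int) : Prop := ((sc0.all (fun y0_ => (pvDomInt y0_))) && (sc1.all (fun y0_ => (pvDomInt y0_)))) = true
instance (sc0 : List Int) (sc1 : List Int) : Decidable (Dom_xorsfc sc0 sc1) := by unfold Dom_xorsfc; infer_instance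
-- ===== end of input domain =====

-- B replaces A's index-based two-state swap DP by a single pairwise (zip) pass summing
-- element-wise minima (objective: simpler). Return-value equivalence only; neither mutates.

-- ===== PORT A =====
def xorsfc (sc0 : List Int) (sc1 : List Int) : Int × Int :=
  let f0 := min (PySem.List.pyGetD sc0 0 0) (PySem.List.pyGetD sc1 0 0)
  let f1 := min (PySem.List.pyGetD sc1 0 0) (PySem.List.pyGetD sc0 0 0)
  (PySem.List.pyRange 1 (sc0.length : Int) 1).foldl
    (fun (st : Int × Int) i =>
      (min (st.1 + PySem.List.pyGetD sc0 i 0) (st.2 + PySem.List.pyGetD sc1 i 0),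
       min (st.2 + PySem.List.pyGetD sc0 i 0) (st.1 + PySem.List.pyGetD sc1 i 0)))
    (f0, f1)

-- ===== PORT B =====
def xorsfc_alt (sc0 : List Int) (sc1 : List Int) : Int × Int :=
  let total := (sc0.zip sc1).foldl
    (fun (total : Int) p => total + (if p.1 < p.2 then p.1 else p.2)) 0
  (total, total)

-- ===== PRECONDITION & SPEC =====
-- Pre_ excludes exactly the inputs where Python A raises IndexError: empty sc0 (at sc0[0]) or sc1 shorter than sc0 (at sc1[i]).
def Pre_xorsfc (sc0 : List Int) (sc1 : List Int) : Prop := sc0 ≠ [] ∧ sc0.length ≤ sc1.length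
instance (sc0 : List Int) (sc1 : List Int) : Decidable (Pre_xorsfc sc0 sc1) := by unfold Pre_xorsfc; infer_instance
def pvWitness_xorsfc : List Int × List Int := ([3, 1, 4], [2, 7, 1])

def Spec_xorsfc (sc0 : List Int) (sc1 : List Int) (out : Int × Int) : Prop := out = xorsfc_alt sc0 sc1
instance (sc0 : List Int) (sc1 : List Int) (out : Int × Int) : Decidable (Spec_xorsfc sc0 sc1 out) := by unfold Spec_xorsfc; infer_instance

-- ===== CLAIM (what is proved, stated in full; the proofs are below) =====
def Claim_equal_xorsfc : Prop := ∀ (sc0 : List Int) (sc1 : List Int), Dom_xorsfc sc0 sc1 → Pre_xorsfc sc0 sc1 → Spec_xorsfc sc0 sc1 (xorsfc sc0 sc1)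
-- ===== LEMMAS AND PROOFS =====

-- The element-wise minima of the two lists (over the common prefix).
def pvMins (sc0 sc1 : List Int) : List Int := (sc0.zip sc1).map (fun p => min p.1 p.2)

-- A's swap-DP fold started from an equal pair stays an equal pair: the scalar fold of the minima.
theorem pv_fold_pair (g0 g1 : Int → Int) (l : List Int) :
    ∀ s : Int,
      l.foldl (fun (st : Int × Int) i =>
          (min (st.1 + g0 i) (st.2 + g1 i), min (st.2 + g0 i) (st.1 + g1 i))) (s, s)
      = (l.foldl (fun (s : Int) i => s + min (g0 i) (g1 i)) s,
         l.foldl (fun (s : Int) i => s + min (g0 i) (g1 i)) s) := by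
  induction l with
  | nil => intro s; rfl
  | cons x xs ih =>
    intro s
    simp only [List.foldl_cons]
    have h1 : min (s + g0 x) (s + g1 x) = s + min (g0 x) (g1 x) := by omega
    rw [h1, ih]

-- A's scalar fold over indices 1..n equals the sum of the minima list (given the length hypothesis).
theorem pv_scalar_eq_sum (sc0 sc1 : List Int) (h0 : sc0 ≠ []) (hl : sc0.length ≤ sc1.length) :
    (PySem.List.pyRange 1 (sc0.length : Int) 1).foldl
      (fun (s : Int) i => s + min (PySem.List.pyGetD sc0 i 0) (PySem.List.pyGetD sc1 i 0))
      (min (PySem.List.pyGetD sc0 0 0) (PySem.List.pyGetD sc1 0 0))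
      = (pvMins sc0 sc1).sum := by
  have hzlen : (pvMins sc0 sc1).length = sc0.length := by
    simp [pvMins, List.length_zip]; omega
  have hcongr :
      (PySem.List.pyRange 1 (sc0.length : Int) 1).foldl
        (fun (s : Int) i => s + min (PySem.List.pyGetD sc0 i 0) (PySem.List.pyGetD sc1 i 0))
        (min (PySem.List.pyGetD sc0 0 0) (PySem.List.pyGetD sc1 0 0))
      = (PySem.List.pyRange 1 (((pvMins sc0 sc1).length : Int)) 1).foldl
        (fun (s : Int) i => s + PySem.List.pyGetD (pvMins sc0 sc1) i 0)
        (min (PySem.List.pyGetD sc0 0 0) (PySem.List.pyGetD sc1 0 0)) := by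
    rw [hzlen]
    refine PySem.List.foldl_congr_mem _ _ _ _ (fun acc i hi => ?_)
    have hmem := (PySem.List.mem_pyRange_one).1 hi
    have h1 : 0 ≤ i := by omega
    have h2 : i.toNat < sc0.length := by omega
    have h2' : i.toNat < sc1.length := by omega
    have h2z : i.toNat < (pvMins sc0 sc1).length := by omega
    rw [PySem.List.pyGetD_eq_getElem sc0 (i:=i) 0 h1 (by omega),
        PySem.List.pyGetD_eq_getElem sc1 (i:=i) 0 h1 (by omega),
        PySem.List.pyGetD_eq_getElem (pvMins sc0 sc1) (i:=i) 0 h1 (by omega)]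
    simp [pvMins, List.getElem_zip]
  rw [hcongr, PySem.List.foldl_pyRange_pyGetD' (pvMins sc0 sc1) 0 (fun (s x : Int) => s + x) _ (by norm_num),
      PySem.List.foldl_add]
  -- head of the minima list is min sc0[0] sc1[0]
  obtain ⟨x, xs, rfl⟩ := List.exists_cons_of_ne_nil h0
  obtain ⟨y, ys, rfl⟩ := List.exists_cons_of_ne_nil (by
    intro h; rw [h] at hl; simp at hl : sc1 ≠ [])
  simp [pvMins, PySem.List.pyGetD, min_def]
  rfl

-- B's fold is the same sum.
theorem pv_alt_eq_sum (sc0 sc1 : List Int) :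
    ((sc0.zip sc1).foldl (fun (total : Int) p => total + (if p.1 < p.2 then p.1 else p.2)) 0)
      = (pvMins sc0 sc1).sum := by
  rw [PySem.List.foldl_add]
  have : ∀ p : Int × Int, (if p.1 < p.2 then p.1 else p.2) = min p.1 p.2 := by
    intro p; rcases p with ⟨a, b⟩; simp only; omega
  simp [pvMins, this]

-- ===== VERDICT (by name: the statement is the Claim_ definition above) =====
theorem xorsfc_spec : Claim_equal_xorsfc := by
  intro sc0 sc1 _ hpre
  unfold Spec_xorsfc xorsfc xorsfc_alt
  rw [min_comm (PySem.List.pyGetD sc1 0 0) (PySem.List.pyGetD sc0 0 0)]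
  rw [pv_fold_pair, pv_scalar_eq_sum sc0 sc1 hpre.1 hpre.2, pv_alt_eq_sum]
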